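-- pv_equiv track=rewrite | github.com/Nandini602/CP_practical | competitive _prog_python/k_distinct.py | kthDistinctString
-- ===== SOURCE A (Python) =====
-- def kthDistinctString(arr, k):
--     distinct_count = 0
--
--     for string in arr:
--         if arr.count(string) == 1:
--             distinct_count += 1
--             if distinct_count == k:
--                 return string
--
--     return ""  # kth distinct string not found
-- ===== SOURCE B (Python) =====
-- def kthDistinctString(arr, k):
--     # Partition recursion: take the head, drop every later copy of it; the head
--     # is a single exactly when it had no later copy. No counting pass at all.
--     while arr:
--         s, rest = arr[0], arr[1:]
--         others = [x for x in rest if x != s]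
--         if len(others) == len(rest):  # s occurs nowhere else: it is a single
--             if k == 1:
--                 return s
--             k -= 1
--         arr = others
--     return ""
-- ===== Notes on version B (the rewrite author's own statement) =====
-- stated objective: faster
-- what changed: Replaces A's scan-with-arr.count-and-running-counter (a full count pass per element) by a partition recursion: take the head, strip all its later copies from the list, detect uniqueness by whether anything was stripped, decrement k on each single found; each distinct value is processed once, so cost is O(n*d) for d distinct values instead of A's O(n^2).
import Mathlib
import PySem

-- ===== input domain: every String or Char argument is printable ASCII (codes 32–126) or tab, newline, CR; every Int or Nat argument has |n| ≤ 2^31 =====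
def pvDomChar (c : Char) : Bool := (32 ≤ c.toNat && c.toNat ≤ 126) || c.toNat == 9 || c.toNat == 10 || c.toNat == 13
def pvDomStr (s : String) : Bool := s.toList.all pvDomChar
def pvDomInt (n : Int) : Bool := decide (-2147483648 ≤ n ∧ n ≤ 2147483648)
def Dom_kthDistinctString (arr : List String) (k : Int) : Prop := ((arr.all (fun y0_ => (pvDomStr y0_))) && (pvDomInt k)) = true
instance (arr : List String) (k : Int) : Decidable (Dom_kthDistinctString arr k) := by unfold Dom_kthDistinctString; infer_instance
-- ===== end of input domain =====

-- B replaces A's scan-with-arr.count loop by a partition recursion (strip the head's later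
-- copies, detect uniqueness by the stripped length, decrement k); alternative structure.


-- ===== PORT A =====
-- A's for-loop with early return, as structural recursion over arr with the running counter.
def kthDistinctStringLoop (arr : List String) (k : Int) : List String → Int → String
  | [], _ => ""
  | s :: rest, dc =>
    if PySem.List.count arr s == 1 then
      if dc + 1 == k then s else kthDistinctStringLoop arr k rest (dc + 1)
    else kthDistinctStringLoop arr k rest dc

def kthDistinctString (arr : List String) (k : Int) : String :=
  kthDistinctStringLoop arr k arr 0

-- ===== PORT B =====
-- B's while loop: head s, others = rest stripped of copies of s; s is a single iff
-- nothing was stripped (lengths equal); on a single, return it when k == 1 else decrement k.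
def kthDistinctStringAltLoop : List String → Int → String
  | [], _ => ""
  | s :: rest, k =>
    let others := rest.filter (fun x => x ≠ s)
    if others.length == rest.length then
      (if k == 1 then s else kthDistinctStringAltLoop others (k - 1))
    else kthDistinctStringAltLoop others k
termination_by l _ => l.length
decreasing_by
  all_goals
    simp only [List.length_unattach, List.length_cons]
    exact Nat.lt_succ_of_le ((List.length_filter_le _ _).trans (by simp))

def kthDistinctString_alt (arr : List String) (k : Int) : String :=
  kthDistinctStringAltLoop arr k

-- ===== PRECONDITION & SPEC =====
def Spec_kthDistinctString (arr : List String) (k : Int) (out : String) : Prop := out = kthDistinctString_alt arr k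
instance (arr : List String) (k : Int) (out : String) : Decidable (Spec_kthDistinctString arr k out) := by unfold Spec_kthDistinctString; infer_instance

-- ===== CLAIM =====
def Claim_equal_kthDistinctString : Prop := ∀ (arr : List String) (k : Int), Dom_kthDistinctString arr k → Spec_kthDistinctString arr k (kthDistinctString arr k)

-- ===== LEMMAS AND PROOFS =====

-- The ordered list of singles of arr (elements occurring exactly once).
def singlesOf (arr : List String) : List String :=
  arr.filter (fun s => (PySem.List.count arr s : Int) == 1)

-- A's loop from state dc selects element number (k - dc) of the remaining singles.
theorem kthDistinctStringLoop_eq (arr : List String) (k : Int) (rest : List String) (dc : Int) :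
    kthDistinctStringLoop arr k rest dc =
      (let f := rest.filter (fun s => (PySem.List.count arr s : Int) == 1)
       if 1 ≤ k - dc ∧ k - dc ≤ (f.length : Int) then f.getD (k - dc - 1).toNat "" else "") := by
  induction rest generalizing dc with
  | nil =>
    simp only [kthDistinctStringLoop, List.filter_nil, List.length_nil, Nat.cast_zero]
    rw [if_neg (by omega)]
  | cons s rest ih =>
    simp only [kthDistinctStringLoop, List.filter_cons]
    by_cases h1 : List.count s arr = 1
    · have hb : ((PySem.List.count arr s : Int) == 1) = true := by
        simp [PySem.List.count_eq, h1]
      rw [if_pos (by simpa [PySem.List.count_eq] using h1), if_pos hb]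
      by_cases h2 : dc + 1 = k
      · have hk : k - dc = 1 := by omega
        rw [if_pos (by simpa using h2)]
        simp [hk]
      · rw [if_neg (by simpa using h2), ih]
        simp only
        by_cases hc : 1 ≤ k - (dc + 1) ∧ k - (dc + 1) ≤ ((rest.filter (fun s => (PySem.List.count arr s : Int) == 1)).length : Int)
        · rw [if_pos hc, if_pos (by simp only [List.length_cons]; push_cast; omega)]
          have hidx : (k - dc - 1).toNat = (k - (dc + 1) - 1).toNat + 1 := by omega
          rw [hidx]
          simp [List.getD]
        · rw [if_neg hc, if_neg (by simp only [List.length_cons]; push_cast at hc ⊢; omega)]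
    · rw [if_neg (by simpa [PySem.List.count_eq] using h1), ih]
      simp [h1]

-- singles recursion, unique head: cons.
theorem singlesOf_cons_notmem (s : String) (rest : List String) (h : s ∉ rest) :
    singlesOf (s :: rest) = s :: singlesOf rest := by
  unfold singlesOf
  rw [List.filter_cons]
  have hs : List.count s (s :: rest) = 1 := by
    simp [List.count_cons_self, List.count_eq_zero_of_not_mem h]
  rw [if_pos (by simp [PySem.List.count_eq, hs])]
  congr 1
  apply List.filter_congr
  intro x hx
  have hxs : s ≠ x := fun he => h (he ▸ hx)
  simp [PySem.List.count_eq, List.count_cons, hxs]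

-- singles recursion, repeated head: singles of the stripped tail.
theorem singlesOf_cons_mem (s : String) (rest : List String) (h : s ∈ rest) :
    singlesOf (s :: rest) = singlesOf (rest.filter (fun x => x ≠ s)) := by
  unfold singlesOf
  rw [List.filter_cons]
  have hs1 := List.one_le_count_iff.mpr h
  rw [if_neg (by simp [PySem.List.count_eq, List.count_cons_self]; omega)]
  rw [List.filter_filter]
  apply List.filter_congr
  intro x hx
  by_cases hxs : x = s
  · subst hxs
    simp [PySem.List.count_eq, List.count_cons_self]
    omega
  · have hcf : List.count x (List.filter (fun y => y ≠ s) rest) = List.count x rest := by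
      rw [List.count_filter (by simp [hxs])]
    simp [PySem.List.count_eq, List.count_cons, Ne.symm hxs, hxs, hcf]

-- B's loop computes selection by position in the singles list.
theorem kthDistinctStringAltLoop_eq (arr : List String) (k : Int) :
    kthDistinctStringAltLoop arr k =
      (if 1 ≤ k ∧ k ≤ ((singlesOf arr).length : Int) then (singlesOf arr).getD (k - 1).toNat "" else "") := by
  induction hn : arr.length using Nat.strong_induction_on generalizing arr k with
  | _ n ih =>
  match arr with
  | [] =>
    simp [kthDistinctStringAltLoop, singlesOf]
  | s :: rest =>
    rw [kthDistinctStringAltLoop]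
    have hlen : (List.filter (fun x => x ≠ s) rest).length ≤ rest.length := List.length_filter_le _ _
    by_cases hmem : s ∈ rest
    · have hne : (List.filter (fun x => x ≠ s) rest).length ≠ rest.length := by
        intro he
        have heq := (List.filter_sublist (l := rest) (p := fun x => x ≠ s)).eq_of_length he
        have := heq ▸ hmem
        simp at this
      rw [if_neg (by simpa using hne)]
      rw [ih _ (by subst hn; simp only [List.length_cons]; omega) _ _ rfl]
      rw [singlesOf_cons_mem s rest hmem]
    · have heq : List.filter (fun x => x ≠ s) rest = rest := by
        apply List.filter_eq_self.mpr
        intro x hx; simp; exact fun he => hmem (he ▸ hx)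
      rw [if_pos (by simp; exact fun x hx he => hmem (he ▸ hx))]
      rw [singlesOf_cons_notmem s rest hmem, heq]
      by_cases hk1 : k = 1
      · subst hk1
        simp [List.getD]
      · rw [if_neg (by simp only [beq_iff_eq]; exact hk1)]
        rw [ih _ (by subst hn; simp) _ _ rfl]
        by_cases hc : 1 ≤ k - 1 ∧ k - 1 ≤ ((singlesOf rest).length : Int)
        · rw [if_pos hc, if_pos (by simp; omega)]
          have : (k - 1).toNat = (k - 1 - 1).toNat + 1 := by omega
          rw [this]
          simp [List.getD]
        · rw [if_neg hc, if_neg (by simp; omega)]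

-- ===== VERDICT =====
theorem kthDistinctString_spec : Claim_equal_kthDistinctString := by
  intro arr k _
  unfold Spec_kthDistinctString kthDistinctString kthDistinctString_alt
  rw [kthDistinctStringLoop_eq, kthDistinctStringAltLoop_eq]
  simp [singlesOf]
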